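-- pv_equiv track=rewrite | github.com/Damien-IR/BJ | 1987.py | solution
-- ===== SOURCE A (Python) =====
-- def solution(r, c, array):
--     # 남 / 북 / 서 / 동
--     ways = [[-1, 0], [1, 0], [0, -1], [0, 1]]
--
--     # 큐 대신 중복 비허용 셋 사용
--     q = set()
--     # 초기값 추가
--     # set 내에는 set이 들어갈 수 없으므로 frozenset으로 만들어 immutable 상태로 변경
--     q.add((0, 0, 1, frozenset(array[0][0])))
--
--     # 결과 값 변수
--     result = 1
--
--     # 큐에 원소가 있는 경우
--     while len(q) > 0:
--         # pop
--         i, j, depth, chars = q.pop()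
--         # 결과 값 비교하여 갱신
--         result = max(result, depth)
--
--         # 4방향 검사
--         for way in ways:
--             # 다음 행 열 좌표 값 설정
--             next_row, next_col = i + way[0], j + way[1]
--             # 인덱스 초과하지 않으면
--             if 0 <= next_row < r and 0 <= next_col < c:
--                 # 다음 문자 확인
--                 next_char = array[next_row][next_col]
--                 # 해당 문자가 사용된 적 없는 경우
--                 if next_char not in chars:
--                     # pop한 frozenset을 set으로 변경
--                     cpy_chars = set(chars)
--                     # set에 char 추가
--                     cpy_chars.add(next_char)
--                     # set을 다시 frozenset으로 변경
--                     cpy_chars = frozenset(cpy_chars)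
--                     # 큐에 다음 좌표 추가
--                     q.add((next_row, next_col, depth + 1, cpy_chars))
--     return result
-- ===== SOURCE B (Python) =====
-- def solution(r, c, array):
--     # Recursive DFS with backtracking via a persistent visited set of used letters,
--     # replacing A's explicit worklist of (pos, depth, letters) states.
--     def dfs(i, j, visited):
--         best = 1
--         for di, dj in ((-1, 0), (1, 0), (0, -1), (0, 1)):
--             ni, nj = i + di, j + dj
--             if 0 <= ni < r and 0 <= nj < c:
--                 ch = array[ni][nj]
--                 if ch not in visited:
--                     best = max(best, 1 + dfs(ni, nj, visited | {ch}))
--         return best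
--     return dfs(0, 0, frozenset(array[0][0]))
-- ===== Notes on version B (the rewrite author's own statement) =====
-- stated objective: idiomatic
-- what changed: A's explicit worklist-set of (position, depth, used-letters) states is replaced by a recursive DFS with backtracking: the recursion stack replaces the frontier set and the per-state depth/letter-set bookkeeping disappears into the call structure.
-- outside the precondition, e.g. on solution(3, 1, [['a'], ['a']]): A returns 1, B returns 1
import Mathlib
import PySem

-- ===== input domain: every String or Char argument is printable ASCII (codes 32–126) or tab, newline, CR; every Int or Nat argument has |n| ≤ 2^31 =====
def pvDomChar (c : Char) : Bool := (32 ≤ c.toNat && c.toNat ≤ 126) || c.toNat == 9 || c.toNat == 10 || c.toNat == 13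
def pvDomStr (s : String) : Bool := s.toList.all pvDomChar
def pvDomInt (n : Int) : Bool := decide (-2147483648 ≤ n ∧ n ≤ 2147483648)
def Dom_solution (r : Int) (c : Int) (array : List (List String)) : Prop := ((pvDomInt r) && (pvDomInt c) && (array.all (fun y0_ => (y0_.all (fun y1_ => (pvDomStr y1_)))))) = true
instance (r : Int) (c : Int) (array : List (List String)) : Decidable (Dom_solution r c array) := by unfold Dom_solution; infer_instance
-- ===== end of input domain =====

-- B replaces A's worklist of (pos, depth, used-letters) states by a recursive DFS with
-- backtracking (objective: simpler / more idiomatic; no speed claim).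
-- Note on the ports: Python's set.pop() order is not modelled by PySem; A's result (a max over
-- all processed states) does not depend on the pop order, and the port pops the head.  The Nat
-- fuel arguments of pvLoop / pvDfs are pure totality guards (always sufficient, proved below).

-- ===== PORT A =====
abbrev PVState := Int × Int × Int × List String   -- (i, j, depth, chars)

def pvWays : List (Int × Int) := [(-1, 0), (1, 0), (0, -1), (0, 1)]

-- array[i][j]; every access made under Pre_solution is in range (defaults never used there)
def pvCell (array : List (List String)) (i j : Int) : String :=
  PySem.List.pyGetD (PySem.List.pyGetD array i []) j ""

-- frozenset(array[0][0]) / set(array[0][0]): the single characters of the start cell, as strings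
def pvStartChars (array : List (List String)) : PySem.Set String :=
  PySem.Set.ofList ((pvCell array 0 0).toList.map (fun ch => String.ofList [ch]))

-- a cheap upper bound on the number of distinct insertable strings (used only to size the fuel)
def pvFuelBase (array : List (List String)) : Nat :=
  (pvCell array 0 0).toList.length + array.flatten.length

-- the inner 'for way in ways' of A: add the admissible successor states of one popped state
def pvSuccs (r c : Int) (array : List (List String)) (i j d : Int) (chars : List String)
    (q : List PVState) : List PVState :=
  pvWays.foldl (fun acc w =>
    if 0 ≤ i + w.1 ∧ i + w.1 < r ∧ 0 ≤ j + w.2 ∧ j + w.2 < c then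
      if pvCell array (i + w.1) (j + w.2) ∈ chars then acc
      else PySem.Set.add acc (i + w.1, j + w.2, d + 1, PySem.Set.add chars (pvCell array (i + w.1) (j + w.2)))
    else acc) q

-- A's 'while len(q) > 0' loop (fuel = totality guard only)
def pvLoop (r c : Int) (array : List (List String)) : Nat → List PVState → Int → Int
  | 0, _, res => res
  | _ + 1, [], res => res
  | f + 1, (i, j, d, chars) :: rest, res =>
      pvLoop r c array f (pvSuccs r c array i j d chars rest) (max res d)

def solution (r : Int) (c : Int) (array : List (List String)) : Int :=
  pvLoop r c array (5 ^ (pvFuelBase array + 2)) [(0, 0, 1, pvStartChars array)] 1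

-- ===== PORT B =====
-- Source B's dfs(i, j, visited) (fuel = totality guard only)
def pvDfs (r c : Int) (array : List (List String)) : Nat → Int → Int → List String → Int
  | 0, _, _, _ => 1
  | f + 1, i, j, vis =>
      pvWays.foldl (fun best w =>
        if 0 ≤ i + w.1 ∧ i + w.1 < r ∧ 0 ≤ j + w.2 ∧ j + w.2 < c then
          if pvCell array (i + w.1) (j + w.2) ∈ vis then best
          else max best (1 + pvDfs r c array f (i + w.1) (j + w.2)
                (PySem.Set.add vis (pvCell array (i + w.1) (j + w.2))))
        else best) 1

def solution_alt (r : Int) (c : Int) (array : List (List String)) : Int :=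
  pvDfs r c array (pvFuelBase array + 1) 0 0 (pvStartChars array)

-- ===== PRECONDITION & SPEC =====
-- Pre_ excludes inputs whose declared r×c region sticks out of the array (beyond the trivial
-- cases c ≤ 0 and r ≤ 1, where only row 0 is reachable): there A raises IndexError on most
-- inputs, but on a few it happens to return (the out-of-range cells are never reached because
-- repeated letters block every path towards them) — those are excluded too, because whether A
-- returns there depends on reachability, not on a checkable shape condition.
def Pre_solution (r : Int) (c : Int) (array : List (List String)) : Prop :=
  array ≠ [] ∧ array.headD [] ≠ [] ∧
    (c ≤ 0 ∨ (r ≤ 1 ∧ c ≤ ((array.headD []).length : Int)) ∨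
      (r ≤ (array.length : Int) ∧ ∀ row ∈ array.take r.toNat, c ≤ (row.length : Int)))
instance (r : Int) (c : Int) (array : List (List String)) : Decidable (Pre_solution r c array) := by
  unfold Pre_solution; infer_instance

def pvWitness_solution : Int × Int × List (List String) :=
  (2, 2, [["a", "b"], ["c", "d"]])

def Spec_solution (r : Int) (c : Int) (array : List (List String)) (out : Int) : Prop := out = solution_alt r c array
instance (r : Int) (c : Int) (array : List (List String)) (out : Int) : Decidable (Spec_solution r c array out) := by unfold Spec_solution; infer_instance

-- ===== CLAIM (what is proved, stated in full; the proofs are below) =====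
def Claim_equal_solution : Prop := ∀ (r : Int) (c : Int) (array : List (List String)), Dom_solution r c array → Pre_solution r c array → Spec_solution r c array (solution r c array)

-- ===== LEMMAS AND PROOFS =====

-- every string either program can ever insert into a chars set (proof-side only)
def pvLetters (array : List (List String)) : PySem.Set String :=
  PySem.Set.ofList ((pvCell array 0 0).toList.map (fun ch => String.ofList [ch]) ++ array.flatten)

-- the value a worklist state contributes: its depth − 1 plus the best path from it (the dfs)
def pvVal (r c : Int) (array : List (List String)) (s : PVState) : Int :=
  s.2.2.1 - 1 + pvDfs r c array (pvFuelBase array + 1) s.1 s.2.1 s.2.2.2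

def pvInv (array : List (List String)) (s : PVState) : Prop :=
  s.2.2.2.Nodup ∧ s.2.2.2 ⊆ pvLetters array

def pvMu (array : List (List String)) (q : List PVState) : Nat :=
  (q.map (fun s => 5 ^ (pvFuelBase array + 1 - s.2.2.2.length))).sum

def pvUnmet (array : List (List String)) (vis : List String) : Nat :=
  ((pvLetters array).filter (fun x => decide (x ∉ vis))).length

-- ---- generic fold lemmas ----
theorem pvFoldlGe {α : Type} (g : Int → α → Int) (h : ∀ b w, b ≤ g b w) :
    ∀ (l : List α) (b : Int), b ≤ l.foldl g b := by
  intro l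
  induction l with
  | nil => intro b; exact le_refl b
  | cons w t ih => intro b; exact le_trans (h b w) (ih (g b w))

theorem pvPull {α : Type} (g : Int → α → Int) (h : ∀ a b w, g (max a b) w = max a (g b w)) :
    ∀ (l : List α) (a b : Int), l.foldl g (max a b) = max a (l.foldl g b) := by
  intro l
  induction l with
  | nil => intro a b; rfl
  | cons w t ih => intro a b; simp only [List.foldl_cons, h a b w, ih]

theorem pvAddShift {α : Type} (g g' : Int → α → Int) (a : Int)
    (h : ∀ b w, g' (a + b) w = a + g b w) :
    ∀ (l : List α) (x : Int), l.foldl g' (a + x) = a + l.foldl g x := by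
  intro l
  induction l with
  | nil => intro x; rfl
  | cons w t ih => intro x; simp only [List.foldl_cons, h x w, ih]

-- ---- basic facts about the ports ----
theorem pvDfs_ge_one (r c : Int) (array : List (List String)) :
    ∀ (f : Nat) (i j : Int) (vis : List String), 1 ≤ pvDfs r c array f i j vis := by
  intro f i j vis
  cases f with
  | zero => exact le_refl 1
  | succ f =>
      show (1 : Int) ≤ pvWays.foldl _ 1
      apply pvFoldlGe
      intro b w
      try dsimp only
      split_ifs with h1 h2
      · exact le_refl b
      · exact le_max_left _ _
      · exact le_refl b

theorem pvCell_mem_letters (r c : Int) (array : List (List String))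
    (hpre : Pre_solution r c array) (ni nj : Int)
    (h0 : 0 ≤ ni) (h1 : ni < r) (h2 : 0 ≤ nj) (h3 : nj < c) :
    pvCell array ni nj ∈ pvLetters array := by
  obtain ⟨hne, hhd, hshape⟩ := hpre
  have hlen0 : 0 < array.length := by
    cases array with
    | nil => exact absurd rfl hne
    | cons a t => simp
  have hmain : ni < (array.length : Int) ∧
      ∀ hh : ni.toNat < array.length, c ≤ ((array[ni.toNat]'hh).length : Int) := by
    rcases hshape with hc0 | ⟨hr1, hc1⟩ | ⟨hr, hrow⟩
    · omega
    · have hni0 : ni.toNat = 0 := by omega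
      refine ⟨by omega, ?_⟩
      intro hh
      have he : array[ni.toNat]'hh = array.headD [] := by
        cases array with
        | nil => exact absurd rfl hne
        | cons a t => simp [hni0]
      rw [he]
      exact hc1
    · have hnilen : ni < (array.length : Int) := lt_of_lt_of_le h1 hr
      refine ⟨hnilen, ?_⟩
      intro hh
      have hrowmem : array[ni.toNat]'hh ∈ array.take r.toNat := by
        have hlt : ni.toNat < (array.take r.toNat).length := by
          simp only [List.length_take]
          omega
        have := List.getElem_mem hlt
        rwa [List.getElem_take] at this
      exact hrow _ hrowmem
  obtain ⟨hnilen, hcall⟩ := hmain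
  have hc : c ≤ ((array[ni.toNat]'(by omega)).length : Int) := hcall (by omega)
  have hcell : pvCell array ni nj = (array[ni.toNat]'(by omega))[nj.toNat]'(by omega) := by
    unfold pvCell
    rw [PySem.List.pyGetD_eq_getElem array ([] : List String) h0 hnilen,
        PySem.List.pyGetD_eq_getElem _ "" h2 (by omega)]
  rw [hcell]
  unfold pvLetters
  rw [PySem.Set.mem_ofList]
  refine List.mem_append_right _ ?_
  rw [List.mem_flatten]
  exact ⟨_, List.getElem_mem _, List.getElem_mem _⟩

theorem pvUnmet_le (array : List (List String)) (vis : List String) :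
    pvUnmet array vis ≤ (pvLetters array).length :=
  List.length_filter_le _ _

theorem pvLettersLen (array : List (List String)) :
    (pvLetters array).length ≤ pvFuelBase array := by
  have h := PySem.Set.length_ofList_le
    ((pvCell array 0 0).toList.map (fun ch => String.ofList [ch]) ++ array.flatten)
  unfold pvLetters pvFuelBase
  simpa using h

theorem pvFilterLt (vis : List String) (ch : String) (hch : ch ∉ vis) :
    ∀ L : List String, ch ∈ L →
      (L.filter (fun x => decide (x ∉ vis ++ [ch]))).length <
        (L.filter (fun x => decide (x ∉ vis))).length := by
  intro L
  induction L with
  | nil => intro h; simp at h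
  | cons x t ih =>
      intro hmem
      have hsub : (t.filter (fun y => decide (y ∉ vis ++ [ch]))).length ≤
          (t.filter (fun y => decide (y ∉ vis))).length := by
        apply List.Sublist.length_le
        apply List.monotone_filter_right
        intro y hy
        simp only [decide_eq_true_eq, List.mem_append, List.mem_singleton] at hy ⊢
        intro h; exact hy (Or.inl h)
      by_cases hx : x = ch
      · subst hx
        rw [List.filter_cons_of_neg (by simp),
            List.filter_cons_of_pos (by simpa using hch)]
        simp only [List.length_cons]
        omega
      · have hmem' : ch ∈ t := by
          rcases List.mem_cons.mp hmem with h | h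
          · exact absurd h.symm hx
          · exact h
        have hlt := ih hmem'
        by_cases hxv : x ∈ vis
        · rw [List.filter_cons_of_neg (by simp [hxv]),
              List.filter_cons_of_neg (by simp [hxv])]
          exact hlt
        · have e2 : x ∉ vis ++ [ch] := by
            simp only [List.mem_append, List.mem_singleton]
            rintro (h | h)
            · exact hxv h
            · exact hx h
          rw [List.filter_cons_of_pos (by simpa using e2),
              List.filter_cons_of_pos (by simpa using hxv)]
          simp only [List.length_cons]
          omega

theorem pvUnmet_lt (array : List (List String)) (vis : List String) (ch : String)
    (hmem : ch ∈ pvLetters array) (hnot : ch ∉ vis) :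
    pvUnmet array (PySem.Set.add vis ch) < pvUnmet array vis := by
  unfold pvUnmet
  rw [PySem.Set.add_of_not_mem hnot]
  exact pvFilterLt vis ch hnot _ hmem

-- dfs does not depend on the fuel once the fuel exceeds the number of missing letters
theorem pvDfs_fuel (r c : Int) (array : List (List String)) (hpre : Pre_solution r c array) :
    ∀ (f1 f2 : Nat) (i j : Int) (vis : List String),
      pvUnmet array vis < f1 → pvUnmet array vis < f2 →
      pvDfs r c array f1 i j vis = pvDfs r c array f2 i j vis := by
  intro f1
  induction f1 with
  | zero => intro f2 i j vis h1 _; omega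
  | succ n1 ih =>
      intro f2 i j vis h1 h2
      cases f2 with
      | zero => omega
      | succ n2 =>
          show pvWays.foldl _ 1 = pvWays.foldl _ 1
          apply PySem.List.foldl_congr_mem'
          intro w _ b
          try dsimp only
          split_ifs with hb hm
          · rfl
          · have hch : pvCell array (i + w.1) (j + w.2) ∈ pvLetters array :=
              pvCell_mem_letters r c array hpre _ _ hb.1 hb.2.1 hb.2.2.1 hb.2.2.2
            have hlt := pvUnmet_lt array vis _ hch hm
            rw [ih n2 _ _ _ (by omega) (by omega)]
          · rfl

-- one-step unfolding of dfs at the canonical fuel, flattened to a single condition,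
-- with the recursive calls again at the canonical fuel
theorem pvDfs_top (r c : Int) (array : List (List String)) (hpre : Pre_solution r c array)
    (i j : Int) (vis : List String) :
    pvDfs r c array (pvFuelBase array + 1) i j vis =
      pvWays.foldl (fun best w =>
        if (0 ≤ i + w.1 ∧ i + w.1 < r ∧ 0 ≤ j + w.2 ∧ j + w.2 < c) ∧
            pvCell array (i + w.1) (j + w.2) ∉ vis then
          max best (1 + pvDfs r c array (pvFuelBase array + 1) (i + w.1) (j + w.2)
              (PySem.Set.add vis (pvCell array (i + w.1) (j + w.2))))
        else best) 1 := by
  show pvWays.foldl _ 1 = pvWays.foldl _ 1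
  apply PySem.List.foldl_congr_mem'
  intro w _ b
  try dsimp only
  by_cases hb : 0 ≤ i + w.1 ∧ i + w.1 < r ∧ 0 ≤ j + w.2 ∧ j + w.2 < c
  · by_cases hm : pvCell array (i + w.1) (j + w.2) ∈ vis
    · rw [if_pos hb, if_pos hm, if_neg (by tauto)]
    · rw [if_pos hb, if_neg hm, if_pos ⟨hb, hm⟩]
      have hch : pvCell array (i + w.1) (j + w.2) ∈ pvLetters array :=
        pvCell_mem_letters r c array hpre _ _ hb.1 hb.2.1 hb.2.2.1 hb.2.2.2
      have hlt := pvUnmet_lt array vis _ hch hm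
      have hle := pvUnmet_le array vis
      have hK := pvLettersLen array
      rw [pvDfs_fuel r c array hpre (pvFuelBase array) (pvFuelBase array + 1)
          _ _ _ (by omega) (by omega)]
  · rw [if_neg hb, if_neg (by tauto)]

-- pvSuccs, flattened to a single condition
theorem pvSuccs_flat (r c : Int) (array : List (List String)) (i j d : Int)
    (chars : List String) (q : List PVState) :
    pvSuccs r c array i j d chars q =
      pvWays.foldl (fun acc w =>
        if (0 ≤ i + w.1 ∧ i + w.1 < r ∧ 0 ≤ j + w.2 ∧ j + w.2 < c) ∧
            pvCell array (i + w.1) (j + w.2) ∉ chars then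
          PySem.Set.add acc (i + w.1, j + w.2, d + 1,
            PySem.Set.add chars (pvCell array (i + w.1) (j + w.2)))
        else acc) q := by
  unfold pvSuccs
  apply PySem.List.foldl_congr_mem'
  intro w _ acc
  try dsimp only
  by_cases hb : 0 ≤ i + w.1 ∧ i + w.1 < r ∧ 0 ≤ j + w.2 ∧ j + w.2 < c
  · by_cases hm : pvCell array (i + w.1) (j + w.2) ∈ chars
    · rw [if_pos hb, if_pos hm, if_neg (by tauto)]
    · rw [if_pos hb, if_neg hm, if_pos ⟨hb, hm⟩]
  · rw [if_neg hb, if_neg (by tauto)]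

-- ---- membership / invariant / measure of the successor fold ----
theorem pvMemFoldlAdd {α : Type} (P : α → Prop) [DecidablePred P] (nst : α → PVState) :
    ∀ (ws : List α) (q : List PVState) (s : PVState),
      s ∈ ws.foldl (fun acc w => if P w then PySem.Set.add acc (nst w) else acc) q →
      s ∈ q ∨ ∃ w, P w ∧ s = nst w := by
  intro ws
  induction ws with
  | nil => intro q s h; exact Or.inl h
  | cons w t ih =>
      intro q s h
      rw [List.foldl_cons] at h
      rcases ih _ s h with h' | h'
      · by_cases hp : P w
        · rw [if_pos hp] at h'
          rcases (PySem.Set.mem_add q (nst w) s).mp h' with h'' | h''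
          · exact Or.inl h''
          · exact Or.inr ⟨w, hp, h''⟩
        · rw [if_neg hp] at h'; exact Or.inl h'
      · exact Or.inr h'

theorem pvMuAdd (array : List (List String)) (q : List PVState) (s : PVState) :
    pvMu array (PySem.Set.add q s) ≤
      pvMu array q + 5 ^ (pvFuelBase array + 1 - s.2.2.2.length) := by
  by_cases h : s ∈ q
  · rw [PySem.Set.add_of_mem h]; exact Nat.le_add_right _ _
  · rw [PySem.Set.add_of_not_mem h]
    unfold pvMu
    rw [List.map_append, List.sum_append]
    simp

theorem pvMuFoldlAdd {α : Type} (array : List (List String)) (P : α → Prop) [DecidablePred P]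
    (nst : α → PVState) (wt : Nat)
    (hwt : ∀ w, P w → 5 ^ (pvFuelBase array + 1 - (nst w).2.2.2.length) ≤ wt) :
    ∀ (ws : List α) (q : List PVState),
      pvMu array (ws.foldl (fun acc w => if P w then PySem.Set.add acc (nst w) else acc) q) ≤
        pvMu array q + ws.length * wt := by
  intro ws
  induction ws with
  | nil => intro q; simp
  | cons w t ih =>
      intro q
      rw [List.foldl_cons]
      refine le_trans (ih _) ?_
      have h3 : (t.length + 1) * wt = t.length * wt + wt := by ring
      by_cases hp : P w
      · rw [if_pos hp]
        have h1 := pvMuAdd array q (nst w)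
        have h2 := hwt w hp
        simp only [List.length_cons]
        omega
      · rw [if_neg hp]
        simp only [List.length_cons]
        omega

-- ---- max-fold algebra ----
theorem pvMFoldAdd (r c : Int) (array : List (List String)) (q : List PVState) (s : PVState)
    (res : Int) :
    (PySem.Set.add q s).foldl (fun m s' => max m (pvVal r c array s')) res =
      max (q.foldl (fun m s' => max m (pvVal r c array s')) res) (pvVal r c array s) := by
  by_cases h : s ∈ q
  · rw [PySem.Set.add_of_mem h]
    exact (max_eq_left ((PySem.List.le_foldl_max_int q (pvVal r c array) res).2 s h)).symm
  · rw [PySem.Set.add_of_not_mem h, List.foldl_append]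
    rfl

theorem pvMFoldFoldlAdd {α : Type} (r c : Int) (array : List (List String)) (P : α → Prop)
    [DecidablePred P] (nst : α → PVState) :
    ∀ (ws : List α) (q : List PVState) (res : Int),
      (ws.foldl (fun acc w => if P w then PySem.Set.add acc (nst w) else acc) q).foldl
          (fun m s' => max m (pvVal r c array s')) res =
        ws.foldl (fun m w => if P w then max m (pvVal r c array (nst w)) else m)
          (q.foldl (fun m s' => max m (pvVal r c array s')) res) := by
  intro ws
  induction ws with
  | nil => intro q res; rfl
  | cons w t ih =>
      intro q res
      rw [List.foldl_cons, List.foldl_cons, ih]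
      congr 1
      by_cases hp : P w
      · rw [if_pos hp, if_pos hp, pvMFoldAdd]
      · rw [if_neg hp, if_neg hp]

theorem pvMStepShape (r c : Int) (array : List (List String)) :
    ∀ (a b : Int) (w : PVState),
      max (max a b) (pvVal r c array w) = max a (max b (pvVal r c array w)) := by
  intro a b w
  exact max_assoc a b (pvVal r c array w)

theorem pvIfShape {α : Type} (P : α → Prop) [DecidablePred P] (g : α → Int) :
    ∀ (a b : Int) (w : α),
      (if P w then max (max a b) (g w) else max a b) =
        max a (if P w then max b (g w) else b) := by
  intro a b w
  by_cases hp : P w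
  · rw [if_pos hp, if_pos hp, max_assoc]
  · rw [if_neg hp, if_neg hp]

theorem pvExch {α : Type} (r c : Int) (array : List (List String)) (P : α → Prop)
    [DecidablePred P] (g : α → Int) :
    ∀ (ws : List α) (rest : List PVState) (x : Int),
      rest.foldl (fun m s' => max m (pvVal r c array s'))
          (ws.foldl (fun m w => if P w then max m (g w) else m) x) =
        ws.foldl (fun m w => if P w then max m (g w) else m)
          (rest.foldl (fun m s' => max m (pvVal r c array s')) x) := by
  intro ws
  induction ws with
  | nil => intro rest x; rfl
  | cons w t ih =>
      intro rest x
      rw [List.foldl_cons, List.foldl_cons, ih]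
      congr 1
      by_cases hp : P w
      · rw [if_pos hp, if_pos hp, max_comm x (g w),
            pvPull (fun m s' => max m (pvVal r c array s')) (pvMStepShape r c array) rest,
            max_comm]
      · rw [if_neg hp, if_neg hp]

-- the value of a state as a fold of its successors' values — B's defining equation, A-shaped
theorem pvValEq (r c : Int) (array : List (List String)) (hpre : Pre_solution r c array)
    (i j d : Int) (chars : List String) :
    pvVal r c array (i, j, d, chars) =
      pvWays.foldl (fun m w =>
        if (0 ≤ i + w.1 ∧ i + w.1 < r ∧ 0 ≤ j + w.2 ∧ j + w.2 < c) ∧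
            pvCell array (i + w.1) (j + w.2) ∉ chars then
          max m (pvVal r c array (i + w.1, j + w.2, d + 1,
            PySem.Set.add chars (pvCell array (i + w.1) (j + w.2))))
        else m) d := by
  have h1 : pvVal r c array (i, j, d, chars) =
      (d - 1) + pvDfs r c array (pvFuelBase array + 1) i j chars := rfl
  rw [h1, pvDfs_top r c array hpre i j chars]
  have h2 := pvAddShift
    (fun best (w : Int × Int) =>
      if (0 ≤ i + w.1 ∧ i + w.1 < r ∧ 0 ≤ j + w.2 ∧ j + w.2 < c) ∧
          pvCell array (i + w.1) (j + w.2) ∉ chars then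
        max best (1 + pvDfs r c array (pvFuelBase array + 1) (i + w.1) (j + w.2)
            (PySem.Set.add chars (pvCell array (i + w.1) (j + w.2))))
      else best)
    (fun m (w : Int × Int) =>
      if (0 ≤ i + w.1 ∧ i + w.1 < r ∧ 0 ≤ j + w.2 ∧ j + w.2 < c) ∧
          pvCell array (i + w.1) (j + w.2) ∉ chars then
        max m (pvVal r c array (i + w.1, j + w.2, d + 1,
          PySem.Set.add chars (pvCell array (i + w.1) (j + w.2))))
      else m)
    (d - 1)
    (by
      intro b w
      try dsimp only
      by_cases hp : (0 ≤ i + w.1 ∧ i + w.1 < r ∧ 0 ≤ j + w.2 ∧ j + w.2 < c) ∧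
          pvCell array (i + w.1) (j + w.2) ∉ chars
      · rw [if_pos hp, if_pos hp]
        have hv : pvVal r c array (i + w.1, j + w.2, d + 1,
            PySem.Set.add chars (pvCell array (i + w.1) (j + w.2))) =
            (d - 1) + (1 + pvDfs r c array (pvFuelBase array + 1) (i + w.1) (j + w.2)
              (PySem.Set.add chars (pvCell array (i + w.1) (j + w.2)))) := by
          dsimp only [pvVal]
          omega
        rw [hv]
        omega
      · rw [if_neg hp, if_neg hp])
    pvWays 1
  have h3 : (d - 1) + 1 = d := by omega
  rw [h3] at h2
  rw [← h2]

-- ---- the worklist computes the running max of the values of its states ----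
theorem pvLoop_eq (r c : Int) (array : List (List String)) (hpre : Pre_solution r c array) :
    ∀ (f : Nat) (q : List PVState) (res : Int),
      (∀ s ∈ q, pvInv array s) → pvMu array q < f →
      pvLoop r c array f q res = q.foldl (fun m s => max m (pvVal r c array s)) res := by
  intro f
  induction f with
  | zero => intro q res _ h; omega
  | succ f ih =>
      intro q res hinv hmu
      match q with
      | [] => rfl
      | (i, j, d, chars) :: rest =>
          obtain ⟨hnd, hsub⟩ := hinv (i, j, d, chars) (List.mem_cons_self)
          have hk : chars.length ≤ pvFuelBase array :=
            le_trans (List.subperm_of_subset hnd hsub).length_le (pvLettersLen array)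
          have hstep : pvLoop r c array (f + 1) ((i, j, d, chars) :: rest) res =
              pvLoop r c array f (pvSuccs r c array i j d chars rest) (max res d) := rfl
          -- invariant is preserved
          have hinv' : ∀ s ∈ pvSuccs r c array i j d chars rest, pvInv array s := by
            intro s hs
            rw [pvSuccs_flat] at hs
            rcases pvMemFoldlAdd _ _ pvWays rest s hs with h' | ⟨w, hp, hse⟩
            · exact hinv s (List.mem_cons_of_mem _ h')
            · subst hse
              constructor
              · exact PySem.Set.nodup_add chars _ hnd
              · intro x hx
                rcases (PySem.Set.mem_add chars _ x).mp hx with h' | h'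
                · exact hsub h'
                · subst h'
                  exact pvCell_mem_letters r c array hpre _ _
                    hp.1.1 hp.1.2.1 hp.1.2.2.1 hp.1.2.2.2
          -- the measure strictly decreases
          have hmu' : pvMu array (pvSuccs r c array i j d chars rest) < f := by
            have hb := pvMuFoldlAdd array
              (fun w : Int × Int =>
                (0 ≤ i + w.1 ∧ i + w.1 < r ∧ 0 ≤ j + w.2 ∧ j + w.2 < c) ∧
                  pvCell array (i + w.1) (j + w.2) ∉ chars)
              (fun w : Int × Int => (i + w.1, j + w.2, d + 1,
                PySem.Set.add chars (pvCell array (i + w.1) (j + w.2))))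
              (5 ^ (pvFuelBase array - chars.length))
              (by
                intro w hp
                have hlen : (PySem.Set.add chars (pvCell array (i + w.1) (j + w.2))).length =
                    chars.length + 1 := by
                  rw [PySem.Set.add_of_not_mem hp.2]
                  simp
                show 5 ^ (pvFuelBase array + 1 - _) ≤ _
                rw [hlen]
                have : pvFuelBase array + 1 - (chars.length + 1) =
                    pvFuelBase array - chars.length := by omega
                rw [this])
              pvWays rest
            rw [← pvSuccs_flat] at hb
            have hq : pvMu array ((i, j, d, chars) :: rest) =
                5 ^ (pvFuelBase array + 1 - chars.length) + pvMu array rest := by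
              unfold pvMu
              rw [List.map_cons, List.sum_cons]
            have hpow : (4 : Nat) * 5 ^ (pvFuelBase array - chars.length) <
                5 ^ (pvFuelBase array + 1 - chars.length) := by
              have he : pvFuelBase array + 1 - chars.length =
                  (pvFuelBase array - chars.length) + 1 := by omega
              rw [he, pow_succ]
              have hx : 0 < 5 ^ (pvFuelBase array - chars.length) :=
                pow_pos (by norm_num) _
              omega
            have hways : (pvWays.length : Nat) = 4 := rfl
            rw [hways] at hb
            omega
          rw [hstep, ih _ _ hinv' hmu']
          -- now the pure max-fold algebra
          have hl : ((i, j, d, chars) :: rest).foldl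
              (fun m s => max m (pvVal r c array s)) res =
              rest.foldl (fun m s => max m (pvVal r c array s))
                (max res (pvVal r c array (i, j, d, chars))) := rfl
          conv_lhs => rw [pvSuccs_flat, pvMFoldFoldlAdd r c array _ _ pvWays rest,
            pvPull _ (pvMStepShape r c array) rest,
            pvPull _ (pvIfShape
              (fun w : Int × Int =>
                (0 ≤ i + w.1 ∧ i + w.1 < r ∧ 0 ≤ j + w.2 ∧ j + w.2 < c) ∧
                  pvCell array (i + w.1) (j + w.2) ∉ chars)
              (fun w : Int × Int => pvVal r c array (i + w.1, j + w.2, d + 1,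
                PySem.Set.add chars (pvCell array (i + w.1) (j + w.2))))) pvWays]
          conv_rhs => rw [hl, pvValEq r c array hpre i j d chars,
            pvPull _ (pvMStepShape r c array) rest,
            pvExch r c array
              (fun w : Int × Int =>
                (0 ≤ i + w.1 ∧ i + w.1 < r ∧ 0 ≤ j + w.2 ∧ j + w.2 < c) ∧
                  pvCell array (i + w.1) (j + w.2) ∉ chars)
              (fun w : Int × Int => pvVal r c array (i + w.1, j + w.2, d + 1,
                PySem.Set.add chars (pvCell array (i + w.1) (j + w.2)))) pvWays rest]

-- ===== VERDICT (by name: the statement is the Claim_ definition above) =====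
theorem solution_spec : Claim_equal_solution := by
  unfold Claim_equal_solution
  intro r c array _ hpre
  unfold Spec_solution solution solution_alt
  have hinv : ∀ s ∈ [((0 : Int), (0 : Int), (1 : Int), pvStartChars array)], pvInv array s := by
    intro s hs
    rw [List.mem_singleton] at hs
    subst hs
    constructor
    · exact PySem.Set.nodup_ofList _
    · intro x hx
      unfold pvStartChars at hx
      rw [PySem.Set.mem_ofList] at hx
      unfold pvLetters
      rw [PySem.Set.mem_ofList]
      exact List.mem_append_left _ hx
  have hmu : pvMu array [((0 : Int), (0 : Int), (1 : Int), pvStartChars array)] <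
      5 ^ (pvFuelBase array + 2) := by
    unfold pvMu
    simp only [List.map_cons, List.map_nil, List.sum_cons, List.sum_nil, Nat.add_zero]
    calc 5 ^ (pvFuelBase array + 1 - (pvStartChars array).length)
        ≤ 5 ^ (pvFuelBase array + 1) :=
          Nat.pow_le_pow_right (by norm_num) (by omega)
      _ < 5 ^ (pvFuelBase array + 2) :=
          Nat.pow_lt_pow_right (by norm_num) (by omega)
  rw [pvLoop_eq r c array hpre _ _ _ hinv hmu]
  show max 1 (pvVal r c array ((0 : Int), (0 : Int), (1 : Int), pvStartChars array)) = _
  have hval : pvVal r c array ((0 : Int), (0 : Int), (1 : Int), pvStartChars array) =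
      pvDfs r c array (pvFuelBase array + 1) 0 0 (pvStartChars array) := by
    dsimp only [pvVal]
    omega
  rw [hval]
  exact max_eq_right (pvDfs_ge_one r c array _ 0 0 _)
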